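-- pv_equiv track=rewrite | github.com/isha912/UwU-hackoverflow-tetris | 1.tetris.py | tetrisGridCreate
-- ===== SOURCE A (Python) =====
-- def tetrisGridCreate(position={}):
--     grid = [[(0,0,0) for x in range(10)] for x in range(20)]
--
--     for i in range(len(grid)):
--         for j in range(len(grid[i])):
--             if (j,i) in position:
--                 c = position[(j,i)]
--                 grid[i][j] = c
--     return grid
-- ===== SOURCE B (Python) =====
-- def tetrisGridCreate(position={}):
--     grid = [[(0, 0, 0)] * 10 for _ in range(20)]
--     for (x, y), c in position.items():
--         if 0 <= x < 10 and 0 <= y < 20: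
--             grid[y][x] = c
--     return grid
-- ===== Notes on version B (the rewrite author's own statement) =====
-- stated objective: idiomatic
-- what changed: Instead of scanning all 200 grid cells with a membership test per cell, B iterates once over the sparse position dict and writes each in-bounds entry directly into a pre-built default grid.
import Mathlib
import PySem

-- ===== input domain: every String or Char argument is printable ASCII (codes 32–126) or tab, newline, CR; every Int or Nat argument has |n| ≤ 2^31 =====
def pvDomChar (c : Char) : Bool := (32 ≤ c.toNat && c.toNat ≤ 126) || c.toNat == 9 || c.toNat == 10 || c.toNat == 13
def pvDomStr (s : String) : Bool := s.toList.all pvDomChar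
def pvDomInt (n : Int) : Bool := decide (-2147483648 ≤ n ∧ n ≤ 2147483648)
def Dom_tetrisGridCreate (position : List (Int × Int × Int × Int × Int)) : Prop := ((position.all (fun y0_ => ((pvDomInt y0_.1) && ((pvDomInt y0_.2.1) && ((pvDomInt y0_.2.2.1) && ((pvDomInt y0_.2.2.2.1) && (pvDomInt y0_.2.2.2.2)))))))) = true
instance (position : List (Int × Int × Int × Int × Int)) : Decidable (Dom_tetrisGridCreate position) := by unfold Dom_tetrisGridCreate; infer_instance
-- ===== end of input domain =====

-- B replaces A's scan of all 200 cells (with a dict membership test per cell) by one pass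
-- over the sparse position dict, writing each in-bounds entry into a pre-built default grid (idiomatic).


-- ===== PORT A =====
-- first-match lookup of key (j,i) in the association list (= '(j,i) in position' / 'position[(j,i)]')
def lookA : List (Int × Int × Int × Int × Int) → Int → Int → Option (Int × Int × Int)
  | [], _, _ => none
  | (x, y, r, g, b) :: rest, j, i =>
      if x = j ∧ y = i then some (r, g, b) else lookA rest j i

-- grid[i][j] = c
def set2 (g : List (List (Int × Int × Int))) (i j : Nat) (c : Int × Int × Int) :
    List (List (Int × Int × Int)) :=
  g.set i ((g[i]?.getD []).set j c)

def tetrisGridCreate (position : List (Int × Int × Int × Int × Int)) : List (List (Int × Int × Int)) :=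
  let grid := List.replicate 20 (List.replicate 10 ((0:Int), (0:Int), (0:Int)))
  (List.range grid.length).foldl (fun (grid : List (List (Int × Int × Int))) (i : Nat) =>
    (List.range (grid[i]?.getD []).length).foldl (fun (grid : List (List (Int × Int × Int))) (j : Nat) =>
      match lookA position (j : Int) (i : Int) with
      | some c => set2 grid i j c
      | none => grid) grid) grid

-- ===== PORT B =====
def tetrisGridCreate_alt (position : List (Int × Int × Int × Int × Int)) : List (List (Int × Int × Int)) :=
  position.foldl
    (fun grid e =>
      if 0 ≤ e.1 ∧ e.1 < 10 ∧ 0 ≤ e.2.1 ∧ e.2.1 < 20 then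
        set2 grid e.2.1.toNat e.1.toNat e.2.2
      else grid)
    (List.replicate 20 (List.replicate 10 ((0:Int), (0:Int), (0:Int))))

-- ===== PRECONDITION & SPEC =====
-- Pre_ excludes association lists with duplicate (x,y) keys: such lists do not represent any
-- Python dict (dict keys are unique), and on them the assoc-list representation is ambiguous
-- (first-match lookup vs last write); both Pythons, which receive a genuine dict, agree there.
def Pre_tetrisGridCreate (position : List (Int × Int × Int × Int × Int)) : Prop :=
  (position.map (fun e => (e.1, e.2.1))).Nodup
instance (position : List (Int × Int × Int × Int × Int)) : Decidable (Pre_tetrisGridCreate position) := by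
  unfold Pre_tetrisGridCreate; infer_instance

def pvWitness_tetrisGridCreate : (List (Int × Int × Int × Int × Int)) :=
  [(1, 2, 3, 4, 5), (0, 0, 7, 7, 7)]

def Spec_tetrisGridCreate (position : List (Int × Int × Int × Int × Int)) (out : List (List (Int × Int × Int))) : Prop := out = tetrisGridCreate_alt position
instance (position : List (Int × Int × Int × Int × Int)) (out : List (List (Int × Int × Int))) : Decidable (Spec_tetrisGridCreate position out) := by unfold Spec_tetrisGridCreate; infer_instance

-- ===== CLAIM (what is proved, stated in full; the proofs are below) =====
def Claim_equal_tetrisGridCreate : Prop := ∀ (position : List (Int × Int × Int × Int × Int)), Dom_tetrisGridCreate position → Pre_tetrisGridCreate position → Spec_tetrisGridCreate position (tetrisGridCreate position)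

-- ===== LEMMAS AND PROOFS =====

-- (i,j) cell of a grid, as an Option
def cell (g : List (List (Int × Int × Int))) (i j : Nat) : Option (Int × Int × Int) :=
  (g[i]?.getD [])[j]?

-- row length, robust to out-of-range i
def rowlen (g : List (List (Int × Int × Int))) (i : Nat) : Nat :=
  (g[i]?.getD []).length

-- the effect of one dict entry for key (j,i) on a cell's current value
def updC (pos : List (Int × Int × Int × Int × Int)) (i j : Nat) (o : Option (Int × Int × Int)) :
    Option (Int × Int × Int) :=
  match lookA pos (j : Int) (i : Int) with
  | some c => o.map (fun _ => c)
  | none => o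

theorem updC_idem (pos : List (Int × Int × Int × Int × Int)) (i j : Nat) (o : Option (Int × Int × Int)) :
    updC pos i j (updC pos i j o) = updC pos i j o := by
  unfold updC; cases lookA pos (j : Int) (i : Int) <;> cases o <;> simp

theorem cell_set2 (g : List (List (Int × Int × Int))) (i j i' j' : Nat) (c : Int × Int × Int) :
    cell (set2 g i j c) i' j' =
      if i' = i ∧ j' = j then (cell g i j).map (fun _ => c) else cell g i' j' := by
  unfold cell set2
  by_cases hii : i' = i
  · subst hii
    by_cases hl : i' < g.length
    · simp [List.getElem?_set, hl]
      by_cases hjj : j' = j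
      · subst hjj
        by_cases hj : j' < g[i'].length
        · simp [hj]
        · simp [hj]
      · simp [hjj, Ne.symm hjj]
    · simp [hl]
  · have hne : ¬ (i = i') := fun h => hii h.symm
    simp [hne, hii]

theorem rowlen_set2 (g : List (List (Int × Int × Int))) (i j i' : Nat) (c : Int × Int × Int) :
    rowlen (set2 g i j c) i' = rowlen g i' := by
  unfold rowlen set2
  by_cases hii : i' = i
  · subst hii
    by_cases hl : i' < g.length
    · simp [hl]
    · simp [hl]
  · have hne : ¬ (i = i') := fun h => hii h.symm
    simp [hne]

theorem length_set2 (g : List (List (Int × Int × Int))) (i j : Nat) (c : Int × Int × Int) :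
    (set2 g i j c).length = g.length := by
  simp [set2]

-- ---------- A side: the two nested loops ----------

theorem innerA_cell (pos : List (Int × Int × Int × Int × Int)) (i : Nat) (js : List Nat)
    (g : List (List (Int × Int × Int))) (i' j' : Nat) :
    cell (js.foldl (fun (grid : List (List (Int × Int × Int))) (j : Nat) =>
        match lookA pos (j : Int) (i : Int) with
        | some c => set2 grid i j c
        | none => grid) g) i' j' =
      if i' = i ∧ j' ∈ js then updC pos i j' (cell g i' j') else cell g i' j' := by
  induction js generalizing g with
  | nil => simp
  | cons j t ih =>
    rw [List.foldl_cons, ih]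
    have hstep : ∀ a b : Nat,
        cell (match lookA pos (j : Int) (i : Int) with
          | some c => set2 g i j c
          | none => g) a b =
        if a = i ∧ b = j then updC pos i b (cell g a b) else cell g a b := by
      intro a b
      cases hc : lookA pos (j : Int) (i : Int) with
      | none =>
        split_ifs with hab
        · obtain ⟨ha, hb⟩ := hab; subst ha; subst hb; simp [updC, hc]
        · rfl
      | some c =>
        rw [cell_set2]
        split_ifs with hab
        · obtain ⟨ha, hb⟩ := hab; subst ha; subst hb; simp [updC, hc]
        · rfl
    rw [hstep i' j']
    by_cases hi : i' = i
    · subst hi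
      by_cases hj : j' = j
      · subst hj
        by_cases hmem : j' ∈ t <;> simp [hmem, updC_idem]
      · by_cases hmem : j' ∈ t <;> simp [hmem, hj, List.mem_cons]
    · simp [hi]

theorem innerA_rowlen (pos : List (Int × Int × Int × Int × Int)) (i : Nat) (js : List Nat)
    (g : List (List (Int × Int × Int))) (i' : Nat) :
    rowlen (js.foldl (fun (grid : List (List (Int × Int × Int))) (j : Nat) =>
        match lookA pos (j : Int) (i : Int) with
        | some c => set2 grid i j c
        | none => grid) g) i' = rowlen g i' := by
  induction js generalizing g with
  | nil => rfl
  | cons j t ih =>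
    rw [List.foldl_cons, ih]
    cases hc : lookA pos (j : Int) (i : Int) <;> simp [rowlen_set2]

theorem innerA_length (pos : List (Int × Int × Int × Int × Int)) (i : Nat) (js : List Nat)
    (g : List (List (Int × Int × Int))) :
    (js.foldl (fun (grid : List (List (Int × Int × Int))) (j : Nat) =>
        match lookA pos (j : Int) (i : Int) with
        | some c => set2 grid i j c
        | none => grid) g).length = g.length := by
  induction js generalizing g with
  | nil => rfl
  | cons j t ih =>
    rw [List.foldl_cons, ih]
    cases hc : lookA pos (j : Int) (i : Int) <;> simp [length_set2]

theorem outerA_cell (pos : List (Int × Int × Int × Int × Int)) (os : List Nat) (hn : os.Nodup)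
    (g : List (List (Int × Int × Int))) (i' j' : Nat) :
    cell (os.foldl (fun (grid : List (List (Int × Int × Int))) (i : Nat) =>
        (List.range (grid[i]?.getD []).length).foldl
          (fun (grid : List (List (Int × Int × Int))) (j : Nat) =>
            match lookA pos (j : Int) (i : Int) with
            | some c => set2 grid i j c
            | none => grid) grid) g) i' j' =
      if i' ∈ os ∧ j' < rowlen g i' then updC pos i' j' (cell g i' j') else cell g i' j' := by
  induction os generalizing g with
  | nil => simp
  | cons i t ih =>
    obtain ⟨hhead, ht⟩ := List.nodup_cons.mp hn
    rw [List.foldl_cons, ih ht]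
    have h1 : ∀ a, rowlen ((List.range (g[i]?.getD []).length).foldl
        (fun (grid : List (List (Int × Int × Int))) (j : Nat) =>
          match lookA pos (j : Int) (i : Int) with
          | some c => set2 grid i j c
          | none => grid) g) a = rowlen g a := fun a => innerA_rowlen pos i _ g a
    have h2 : ∀ a b, cell ((List.range (g[i]?.getD []).length).foldl
        (fun (grid : List (List (Int × Int × Int))) (j : Nat) =>
          match lookA pos (j : Int) (i : Int) with
          | some c => set2 grid i j c
          | none => grid) g) a b =
        if a = i ∧ b < rowlen g i then updC pos i b (cell g a b) else cell g a b := by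
      intro a b
      rw [innerA_cell]
      simp [List.mem_range, rowlen]
    rw [h1 i', h2 i' j']
    by_cases hi : i' = i
    · subst hi
      have hnott : i' ∉ t := hhead
      by_cases hj : j' < rowlen g i' <;> simp [hnott, hj]
    · by_cases hmem : i' ∈ t <;> simp [hi, hmem]

theorem outerA_rowlen (pos : List (Int × Int × Int × Int × Int)) (os : List Nat)
    (g : List (List (Int × Int × Int))) (i' : Nat) :
    rowlen (os.foldl (fun (grid : List (List (Int × Int × Int))) (i : Nat) =>
        (List.range (grid[i]?.getD []).length).foldl
          (fun (grid : List (List (Int × Int × Int))) (j : Nat) =>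
            match lookA pos (j : Int) (i : Int) with
            | some c => set2 grid i j c
            | none => grid) grid) g) i' = rowlen g i' := by
  induction os generalizing g with
  | nil => rfl
  | cons i t ih => rw [List.foldl_cons, ih, innerA_rowlen]

theorem outerA_length (pos : List (Int × Int × Int × Int × Int)) (os : List Nat)
    (g : List (List (Int × Int × Int))) :
    (os.foldl (fun (grid : List (List (Int × Int × Int))) (i : Nat) =>
        (List.range (grid[i]?.getD []).length).foldl
          (fun (grid : List (List (Int × Int × Int))) (j : Nat) =>
            match lookA pos (j : Int) (i : Int) with
            | some c => set2 grid i j c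
            | none => grid) grid) g).length = g.length := by
  induction os generalizing g with
  | nil => rfl
  | cons i t ih => rw [List.foldl_cons, ih, innerA_length]

-- ---------- B side: one pass over the entries ----------

theorem lookA_none (pos : List (Int × Int × Int × Int × Int)) (j i : Int)
    (h : (j, i) ∉ pos.map (fun e => (e.1, e.2.1))) : lookA pos j i = none := by
  induction pos with
  | nil => rfl
  | cons e t ih =>
    obtain ⟨x, y, r, g, b⟩ := e
    simp only [List.map_cons, List.mem_cons] at h
    push Not at h
    rw [lookA, if_neg, ih h.2]
    rintro ⟨hx, hy⟩
    exact h.1 (by simp [hx, hy])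

theorem foldB_cell (pos : List (Int × Int × Int × Int × Int))
    (h : (pos.map (fun e => (e.1, e.2.1))).Nodup)
    (g : List (List (Int × Int × Int))) (i' j' : Nat) (hi : i' < 20) (hj : j' < 10) :
    cell (pos.foldl (fun (grid : List (List (Int × Int × Int))) e =>
        if 0 ≤ e.1 ∧ e.1 < 10 ∧ 0 ≤ e.2.1 ∧ e.2.1 < 20 then
          set2 grid e.2.1.toNat e.1.toNat e.2.2
        else grid) g) i' j' = updC pos i' j' (cell g i' j') := by
  induction pos generalizing g with
  | nil => simp [updC, lookA]
  | cons e t ih =>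
    obtain ⟨x, y, r, gg, b⟩ := e
    obtain ⟨hhead, ht⟩ := List.nodup_cons.mp h
    rw [List.foldl_cons, ih ht]
    by_cases hm : x = (j' : Int) ∧ y = (i' : Int)
    · obtain ⟨hx, hy⟩ := hm
      subst hx; subst hy
      have hb : (0:Int) ≤ (j' : Int) ∧ (j' : Int) < 10 ∧ (0:Int) ≤ (i' : Int) ∧ (i' : Int) < 20 := by
        refine ⟨by positivity, by exact_mod_cast hj, by positivity, by exact_mod_cast hi⟩
      have hnone : lookA t (j' : Int) (i' : Int) = none := by
        apply lookA_none
        simpa using hhead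
      simp only [if_pos hb, Int.toNat_natCast]
      rw [cell_set2, if_pos ⟨rfl, rfl⟩]
      simp [updC, hnone, lookA]
    · have hunch : cell (if 0 ≤ x ∧ x < 10 ∧ 0 ≤ y ∧ y < 20 then
          set2 g y.toNat x.toNat (r, gg, b) else g) i' j' = cell g i' j' := by
        by_cases hbb : (0:Int) ≤ x ∧ x < 10 ∧ 0 ≤ y ∧ y < 20
        · rw [if_pos hbb, cell_set2, if_neg]
          rintro ⟨h1, h2⟩
          exact hm ⟨by omega, by omega⟩
        · rw [if_neg hbb]
      rw [hunch]
      have : lookA ((x, y, r, gg, b) :: t) (j' : Int) (i' : Int) = lookA t (j' : Int) (i' : Int) := by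
        rw [lookA, if_neg hm]
      simp [updC, this]

theorem foldB_rowlen (pos : List (Int × Int × Int × Int × Int))
    (g : List (List (Int × Int × Int))) (i' : Nat) :
    rowlen (pos.foldl (fun (grid : List (List (Int × Int × Int))) e =>
        if 0 ≤ e.1 ∧ e.1 < 10 ∧ 0 ≤ e.2.1 ∧ e.2.1 < 20 then
          set2 grid e.2.1.toNat e.1.toNat e.2.2
        else grid) g) i' = rowlen g i' := by
  induction pos generalizing g with
  | nil => rfl
  | cons e t ih =>
    rw [List.foldl_cons, ih]
    split_ifs <;> simp [rowlen_set2]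

theorem foldB_length (pos : List (Int × Int × Int × Int × Int))
    (g : List (List (Int × Int × Int))) :
    (pos.foldl (fun (grid : List (List (Int × Int × Int))) e =>
        if 0 ≤ e.1 ∧ e.1 < 10 ∧ 0 ≤ e.2.1 ∧ e.2.1 < 20 then
          set2 grid e.2.1.toNat e.1.toNat e.2.2
        else grid) g).length = g.length := by
  induction pos generalizing g with
  | nil => rfl
  | cons e t ih =>
    rw [List.foldl_cons, ih]
    split_ifs <;> simp [length_set2]

-- ---------- the default grid and grid extensionality ----------

theorem g0_rowlen (i' : Nat) (hi : i' < 20) :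
    rowlen (List.replicate 20 (List.replicate 10 ((0:Int), (0:Int), (0:Int)))) i' = 10 := by
  unfold rowlen
  rw [List.getElem?_replicate, if_pos hi]
  rfl

theorem grids_ext (X Y : List (List (Int × Int × Int)))
    (hXl : X.length = 20) (hYl : Y.length = 20)
    (hXr : ∀ i' < 20, rowlen X i' = 10) (hYr : ∀ i' < 20, rowlen Y i' = 10)
    (hc : ∀ i' j', i' < 20 → j' < 10 → cell X i' j' = cell Y i' j') : X = Y := by
  apply List.ext_getElem? fun i => ?_
  by_cases hi : i < 20
  · have hXi : X[i]? = some (X[i]'(by omega)) := List.getElem?_eq_getElem (by omega)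
    have hYi : Y[i]? = some (Y[i]'(by omega)) := List.getElem?_eq_getElem (by omega)
    rw [hXi, hYi]
    congr 1
    apply List.ext_getElem? fun j => ?_
    have hxr := hXr i hi
    have hyr := hYr i hi
    simp only [rowlen, hXi, hYi, Option.getD_some] at hxr hyr
    by_cases hjj : j < 10
    · have := hc i j hi hjj
      simpa [cell, hXi, hYi] using this
    · rw [List.getElem?_eq_none (by omega), List.getElem?_eq_none (by omega)]
  · rw [List.getElem?_eq_none (by omega), List.getElem?_eq_none (by omega)]

-- ===== VERDICT (by name: the statement is the Claim_ definition above) =====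
theorem tetrisGridCreate_spec : Claim_equal_tetrisGridCreate := by
  intro pos _ hpre
  unfold Spec_tetrisGridCreate
  have hA : tetrisGridCreate pos =
      (List.range 20).foldl (fun (grid : List (List (Int × Int × Int))) (i : Nat) =>
        (List.range (grid[i]?.getD []).length).foldl
          (fun (grid : List (List (Int × Int × Int))) (j : Nat) =>
            match lookA pos (j : Int) (i : Int) with
            | some c => set2 grid i j c
            | none => grid) grid)
        (List.replicate 20 (List.replicate 10 ((0:Int), (0:Int), (0:Int)))) := rfl
  have hB : tetrisGridCreate_alt pos =
      pos.foldl (fun (grid : List (List (Int × Int × Int))) e =>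
        if 0 ≤ e.1 ∧ e.1 < 10 ∧ 0 ≤ e.2.1 ∧ e.2.1 < 20 then
          set2 grid e.2.1.toNat e.1.toNat e.2.2
        else grid)
        (List.replicate 20 (List.replicate 10 ((0:Int), (0:Int), (0:Int)))) := rfl
  apply grids_ext
  · rw [hA, outerA_length]; simp
  · rw [hB, foldB_length]; simp
  · intro i' hi
    rw [hA, outerA_rowlen]; exact g0_rowlen i' hi
  · intro i' hi
    rw [hB, foldB_rowlen]; exact g0_rowlen i' hi
  · intro i' j' hi hj
    rw [hA, hB, outerA_cell pos (List.range 20) (List.nodup_range),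
        foldB_cell pos hpre _ i' j' hi hj]
    rw [if_pos ⟨List.mem_range.mpr hi, by rw [g0_rowlen i' hi]; exact hj⟩]
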